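-- pv_equiv track=rewrite | github.com/lhproject/luohua | luohua/auth/role.py | has_cap
-- ===== SOURCE A (Python) =====
-- OMNI_CAP = '*'
--
-- def _check_valid_cap(cap, allow_omni):
--     '''检查权限名合法性.
--
--     其实就是看下是不是空字符串, 还有第一个字符不能是减号, 如果是就抛异常.
--     有些地方会用到全能权限, 这里也有相应的判断.
--
--     '''
--
--     if not cap:
--         raise ValueError('capability name cannot be empty')
--
--     if not allow_omni and cap == OMNI_CAP:
--         raise ValueError('omni-capability cannot be used here')
--
--     if cap[0] == '-':
--         raise ValueError('minus sign cannot precede capability name')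
--
-- def has_cap(caps, requested_cap):
--     '''检查给定的权限表是否具备指定的权限, 指定权限可以是全能权限 (``*``).
--
--     :param caps: 权限表, 需要是可迭代对象.
--     :type caps: :data:`types.GeneratorType`
--     :param requested_cap: 所请求的权限.
--     :type requested_cap: :data:`six.text_type`
--     :return: 权限检查的结果, :const:`True` 为具备所指权限, 反之不具备.
--     :rtype: bool
--
--     '''
--
--     _check_valid_cap(requested_cap, True)
--
--     caps_set = set(caps) if not isinstance(caps, set) else caps
--     negative_caps = set(cap[1:] for cap in caps_set if cap[0] == '-')
--
--     # 拒绝压倒一切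
--     if requested_cap in negative_caps:
--         return False
--
--     # 全能权限
--     # 已经处理过拒绝权限了所以直接返回就行了
--     if OMNI_CAP in caps_set:
--         return True
--
--     return requested_cap in caps_set
-- ===== SOURCE B (Python) =====
-- OMNI_CAP = '*'
--
-- def _check_valid_cap(cap, allow_omni):
--     if not cap:
--         raise ValueError('capability name cannot be empty')
--     if not allow_omni and cap == OMNI_CAP:
--         raise ValueError('omni-capability cannot be used here')
--     if cap[0] == '-':
--         raise ValueError('minus sign cannot precede capability name')
--
-- def has_cap(caps, requested_cap):
--     _check_valid_cap(requested_cap, True)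
--
--     # classify every cap by how strongly it decides the request:
--     # 2 = explicit denial (strongest), 1 = omni grant, 0 = exact grant,
--     # -1 = irrelevant; the verdict is determined by the strongest cap seen.
--     def strength(cap):
--         if cap[0] == '-':
--             return 2 if cap[1:] == requested_cap else -1
--         if cap == OMNI_CAP:
--             return 1
--         return 0 if cap == requested_cap else -1
--
--     best = max(map(strength, caps), default=-1)
--     return best == 0 or best == 1
-- ===== Notes on version B (the rewrite author's own statement) =====
-- stated objective: alternative
-- what changed: Replaces the two-set membership logic (set(caps) plus a derived negation set) by a classify-and-reduce scheme: each cap is mapped to a decision strength (denial 2 > omni 1 > exact grant 0 > irrelevant -1) and the verdict is read off the maximum strength.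
import Mathlib
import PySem

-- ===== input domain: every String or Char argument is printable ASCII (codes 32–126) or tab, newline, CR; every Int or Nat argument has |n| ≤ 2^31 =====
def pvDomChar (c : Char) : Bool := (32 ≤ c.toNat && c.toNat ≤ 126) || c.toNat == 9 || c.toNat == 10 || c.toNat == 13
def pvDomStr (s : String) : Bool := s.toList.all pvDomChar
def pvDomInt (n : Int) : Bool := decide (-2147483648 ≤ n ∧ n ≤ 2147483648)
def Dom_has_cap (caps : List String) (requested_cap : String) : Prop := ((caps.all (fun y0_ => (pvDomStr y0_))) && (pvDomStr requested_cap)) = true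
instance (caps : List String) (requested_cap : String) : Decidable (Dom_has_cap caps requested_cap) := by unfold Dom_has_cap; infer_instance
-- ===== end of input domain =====

-- B replaces A's two-set membership logic by classify-and-reduce: each cap is mapped to a
-- decision strength (denial > omni > exact grant > irrelevant) and the verdict is the maximum
-- strength (objective: alternative, same cost).

-- ===== PORT A =====
def has_cap (caps : List String) (requested_cap : String) : Bool :=
  -- _check_valid_cap(requested_cap, True) raises outside Pre_; inside Pre_ it is a no-op
  let caps_set : PySem.Set String := PySem.Set.ofList caps
  -- set comprehension over caps_set: a Set only tested for membership afterwards, so iteration order is immaterial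
  let negative_caps : PySem.Set String :=
    PySem.Set.ofList ((caps_set.filter (fun cap => cap.toList.head? == some '-')).map
      (fun cap => PySem.Str.slice cap (some 1) none))
  if negative_caps.contains requested_cap then false
  else if caps_set.contains "*" then true
  else caps_set.contains requested_cap

-- ===== PORT B =====
-- strength(cap): 2 = denial match, 1 = omni, 0 = exact grant, -1 = irrelevant
def hc_strength (requested_cap cap : String) : Int :=
  if cap.toList.head? == some '-' then
    (if PySem.Str.slice cap (some 1) none == requested_cap then 2 else -1)
  else if cap == "*" then 1
  else if cap == requested_cap then 0 else -1

def has_cap_alt (caps : List String) (requested_cap : String) : Bool :=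
  -- _check_valid_cap(requested_cap, True) raises outside Pre_; inside Pre_ it is a no-op
  -- max(map(strength, caps), default=-1): every strength is ≥ -1, so the fold from -1 is exact
  let best : Int := (caps.map (hc_strength requested_cap)).foldl max (-1)
  best == 0 || best == 1

-- ===== PRECONDITION & SPEC =====
-- Pre_ excludes exactly the inputs where the Python raises: an empty requested_cap or one starting
-- with '-' (ValueError in _check_valid_cap), and an empty string among caps (IndexError on cap[0]).
def Pre_has_cap (caps : List String) (requested_cap : String) : Prop :=
  requested_cap.toList ≠ [] ∧ requested_cap.toList.head? ≠ some '-' ∧ ∀ c ∈ caps, c.toList ≠ []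
instance (caps : List String) (requested_cap : String) : Decidable (Pre_has_cap caps requested_cap) := by
  unfold Pre_has_cap; infer_instance
def pvWitness_has_cap : List String × String := (["read", "-write", "*"], "read")
def Spec_has_cap (caps : List String) (requested_cap : String) (out : Bool) : Prop := out = has_cap_alt caps requested_cap
instance (caps : List String) (requested_cap : String) (out : Bool) : Decidable (Spec_has_cap caps requested_cap out) := by unfold Spec_has_cap; infer_instance

-- ===== CLAIM (what is proved, stated in full; the proofs are below) =====
def Claim_equal_has_cap : Prop := ∀ (caps : List String) (requested_cap : String), Dom_has_cap caps requested_cap → Pre_has_cap caps requested_cap → Spec_has_cap caps requested_cap (has_cap caps requested_cap)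

-- ===== LEMMAS AND PROOFS =====

-- the fold by max is at least k iff some element (or the seed) is
theorem hc_fold_ge (l : List Int) (a k : Int) :
    k ≤ l.foldl max a ↔ k ≤ a ∨ ∃ x ∈ l, k ≤ x := by
  induction l generalizing a with
  | nil => simp
  | cons x xs ih =>
    rw [List.foldl_cons, ih]
    simp only [le_max_iff, List.mem_cons]
    constructor
    · rintro (( h | h) | ⟨y, hy, hk⟩)
      · exact Or.inl h
      · exact Or.inr ⟨x, Or.inl rfl, h⟩
      · exact Or.inr ⟨y, Or.inr hy, hk⟩
    · rintro (h | ⟨y, (rfl | hy), hk⟩)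
      · exact Or.inl (Or.inl h)
      · exact Or.inl (Or.inr hk)
      · exact Or.inr ⟨y, hy, hk⟩

-- A's negation-set membership, unfolded to a plain existential over caps
theorem hc_mem_neg (caps : List String) (req : String) :
    (req ∈ ((PySem.Set.ofList caps).filter (fun cap => cap.toList.head? == some '-')).map
      (fun cap => PySem.Str.slice cap (some 1) none))
    ↔ ∃ c ∈ caps, c.toList.head? = some '-' ∧ PySem.Str.slice c (some 1) none = req := by
  simp only [List.mem_map, List.mem_filter, PySem.Set.mem_ofList, beq_iff_eq]
  constructor
  · rintro ⟨c, ⟨hc, hh⟩, hs⟩; exact ⟨c, hc, hh, hs⟩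
  · rintro ⟨c, hc, hh, hs⟩; exact ⟨c, ⟨hc, hh⟩, hs⟩

-- ===== VERDICT (by name: the statement is the Claim_ definition above) =====
theorem has_cap_spec : Claim_equal_has_cap := by
  intro caps req _hdom hpre
  obtain ⟨hne, hhead, _hcaps⟩ := hpre
  unfold Spec_has_cap has_cap has_cap_alt
  simp only []
  set best : Int := (caps.map (hc_strength req)).foldl max (-1) with hbest
  -- characterize the two threshold facts about best
  have hge : ∀ k : Int, (k ≤ best ↔ k ≤ -1 ∨ ∃ c ∈ caps, k ≤ hc_strength req c) := by
    intro k
    rw [hbest, hc_fold_ge]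
    simp only [List.mem_map]
    constructor
    · rintro (h | ⟨x, ⟨c, hc, rfl⟩, hk⟩)
      · exact Or.inl h
      · exact Or.inr ⟨c, hc, hk⟩
    · rintro (h | ⟨c, hc, hk⟩)
      · exact Or.inl h
      · exact Or.inr ⟨hc_strength req c, ⟨c, hc, rfl⟩, hk⟩
  -- the three semantic propositions
  have hN : (2 ≤ best) ↔ ∃ c ∈ caps, c.toList.head? = some '-' ∧ PySem.Str.slice c (some 1) none = req := by
    rw [hge 2]
    constructor
    · rintro ((h : (2:Int) ≤ -1) | ⟨c, hc, hk⟩)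
      · omega
      · refine ⟨c, hc, ?_⟩
        unfold hc_strength at hk
        split_ifs at hk with h1 h2 h3 <;> simp_all
    · rintro ⟨c, hc, hh, hs⟩
      refine Or.inr ⟨c, hc, ?_⟩
      unfold hc_strength
      simp [hh, hs]
  have hP : (0 ≤ best) ↔ ∃ c ∈ caps,
      (c.toList.head? = some '-' ∧ PySem.Str.slice c (some 1) none = req) ∨ c = "*" ∨ c = req := by
    rw [hge 0]
    constructor
    · rintro ((h : (0:Int) ≤ -1) | ⟨c, hc, hk⟩)
      · omega
      · refine ⟨c, hc, ?_⟩
        unfold hc_strength at hk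
        split_ifs at hk with h1 h2 h3 <;> simp_all
    · rintro ⟨c, hc, hor⟩
      refine Or.inr ⟨c, hc, ?_⟩
      unfold hc_strength
      rcases hor with ⟨hh, hs⟩ | rfl | rfl
      · simp [hh, hs]
      · split_ifs <;> simp_all
      · split_ifs <;> simp_all
  -- A's three tests, as plain existentials
  have e1 : (PySem.Set.ofList (((PySem.Set.ofList caps).filter
        (fun cap => cap.toList.head? == some '-')).map
        (fun cap => PySem.Str.slice cap (some 1) none))).contains req
      = decide (∃ c ∈ caps, c.toList.head? = some '-' ∧ PySem.Str.slice c (some 1) none = req) := by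
    rw [Bool.eq_iff_iff, PySem.Set.contains_iff, PySem.Set.mem_ofList, hc_mem_neg]
    simp
  have e2 : (PySem.Set.ofList caps).contains "*" = decide ("*" ∈ caps) := by
    rw [Bool.eq_iff_iff, PySem.Set.contains_iff, PySem.Set.mem_ofList]; simp
  have e3 : (PySem.Set.ofList caps).contains req = decide (req ∈ caps) := by
    rw [Bool.eq_iff_iff, PySem.Set.contains_iff, PySem.Set.mem_ofList]; simp
  rw [e1, e2, e3]
  -- B's result as thresholds: best ∈ {0,1} ↔ 0 ≤ best ∧ ¬ 2 ≤ best  (best is an integer ≤ 2)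
  have hB : (best == 0 || best == 1) = decide (0 ≤ best ∧ ¬ 2 ≤ best) := by
    rw [Bool.eq_iff_iff]
    simp only [Bool.or_eq_true, beq_iff_eq, decide_eq_true_eq]
    omega
  rw [hB]
  by_cases hNp : ∃ c ∈ caps, c.toList.head? = some '-' ∧ PySem.Str.slice c (some 1) none = req
  · -- a denial exists: both sides false
    have h2 : 2 ≤ best := hN.mpr hNp
    simp [hNp, h2]
  · have h2 : ¬ 2 ≤ best := fun h => hNp (hN.mp h)
    by_cases hO : "*" ∈ caps
    · -- omni present, no denial: both sides true
      have h0 : 0 ≤ best := hP.mpr ⟨"*", hO, Or.inr (Or.inl rfl)⟩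
      simp [hNp, hO, h0, h2]
    · simp only [hNp, hO, decide_false, Bool.false_eq_true, if_false]
      rw [Bool.eq_iff_iff]
      simp only [decide_eq_true_eq]
      constructor
      · intro hreq
        exact ⟨hP.mpr ⟨req, hreq, Or.inr (Or.inr rfl)⟩, h2⟩
      · rintro ⟨h0, -⟩
        obtain ⟨c, hc, hor⟩ := hP.mp h0
        rcases hor with ⟨hh, hs⟩ | rfl | rfl
        · exact absurd ⟨c, hc, hh, hs⟩ hNp
        · exact absurd hc hO
        · exact hc
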